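-- pv_equiv track=rewrite | github.com/Guiyom974/Autoresearch-BatchMode | experiments/breakthrough/Computational Number Theory - Adaptive LDAB Calibration - 20260327_164958/run_007/05_experiment_code.py | get_primorials
-- ===== SOURCE A (Python) =====
-- def get_primes(n):
--     """Simple sieve to get first n primes."""
--     primes = []
--     candidate = 2
--     while len(primes) < n:
--         is_prime = True
--         for p in primes:
--             if p * p > candidate:
--                 break
--             if candidate % p == 0:
--                 is_prime = False
--                 break
--         if is_prime:
--             primes.append(candidate)
--         candidate += 1
--     return primes
--
-- def get_primorials(k_max):
--     primes = get_primes(k_max)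
--     primorials = []
--     current = 1
--     for p in primes:
--         current *= p
--         primorials.append(current)
--     return primorials
-- ===== SOURCE B (Python) =====
-- def _sieve(limit):
--     comp = [False] * (limit + 1)
--     primes = []
--     for i in range(2, limit + 1):
--         if not comp[i]:
--             primes.append(i)
--             for j in range(i * i, limit + 1, i):
--                 comp[j] = True
--     return primes
--
-- def get_primorials(k_max):
--     if k_max <= 0:
--         return []
--     limit = 4
--     while True:
--         primes = _sieve(limit)
--         if len(primes) >= k_max:
--             break
--         limit *= 2
--     result = []
--     current = 1
--     for p in primes[:k_max]:
--         current *= p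
--         result.append(current)
--     return result
-- ===== Notes on version B (the rewrite author's own statement) =====
-- stated objective: alternative
-- what changed: A generates each prime by trial division against all previously found primes up to its square root; B generates the primes with a Sieve of Eratosthenes run under an upper bound that doubles until it contains k_max primes, then takes the running products.
import Mathlib
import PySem

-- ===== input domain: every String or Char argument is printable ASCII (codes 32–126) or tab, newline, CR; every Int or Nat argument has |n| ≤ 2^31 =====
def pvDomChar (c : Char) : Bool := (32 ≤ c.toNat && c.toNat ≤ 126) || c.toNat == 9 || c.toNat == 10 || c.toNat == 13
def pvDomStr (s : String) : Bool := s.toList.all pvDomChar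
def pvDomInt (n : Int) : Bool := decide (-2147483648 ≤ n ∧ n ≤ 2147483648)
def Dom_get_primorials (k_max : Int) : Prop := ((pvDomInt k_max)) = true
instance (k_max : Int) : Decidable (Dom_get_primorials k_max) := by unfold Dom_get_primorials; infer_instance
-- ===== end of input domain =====

-- B replaces A's one-by-one trial division by previously found primes with a Sieve of
-- Eratosthenes run under a doubling upper bound (objective: alternative algorithm).

-- ===== PORT A =====
-- A-side helper: the inner `for p in primes` loop with its two breaks
def pvTrialA (candidate : Nat) : List Nat → Bool
  | [] => true
  | p :: ps =>
    if candidate < p * p then true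
    else if candidate % p = 0 then false
    else pvTrialA candidate ps

-- A-side helper: the `while len(primes) < n` loop; the fuel argument only makes the
-- unbounded while-loop structurally total (2^(n+1) steps are proved sufficient below)
def pvLoopA (fuel n : Nat) (primes : List Nat) (candidate : Nat) : List Nat :=
  match fuel with
  | 0 => primes
  | f + 1 =>
    if primes.length < n then
      pvLoopA f n (if pvTrialA candidate primes then primes ++ [candidate] else primes)
        (candidate + 1)
    else primes

def pvGetPrimes (n : Nat) : List Nat := pvLoopA (2 ^ (n + 1)) n [] 2

-- shared final loop of both Pythons: `current *= p; primorials.append(current)`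
def pvRunProd (current : Nat) : List Nat → List Nat
  | [] => []
  | p :: ps => (current * p) :: pvRunProd (current * p) ps

def get_primorials (k_max : Int) : List Int :=
  (pvRunProd 1 (pvGetPrimes k_max.toNat)).map (fun x => (x : Int))

-- ===== PORT B =====
-- B-side helper: the inner marking loop `for j in range(i*i, limit+1, i)` (the `0 < i`
-- conjunct only makes the recursion total; every call has 2 ≤ i)
def pvMark (limit i j : Nat) (comp : List Bool) : List Bool :=
  if _h : 0 < i ∧ j ≤ limit then pvMark limit i (j + i) (comp.set j true) else comp
  termination_by limit + 1 - j
  decreasing_by omega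

-- B-side helper: the outer `for i in range(2, limit+1)` loop of the sieve
def pvOuter (limit i : Nat) (primes : List Nat) (comp : List Bool) : List Nat :=
  if _h : i ≤ limit then
    if comp.getD i false then pvOuter limit (i + 1) primes comp
    else pvOuter limit (i + 1) (primes ++ [i]) (pvMark limit i (i * i) comp)
  else primes
  termination_by limit + 1 - i

def pvSieve (limit : Nat) : List Nat := pvOuter limit 2 [] (List.replicate (limit + 1) false)

-- B-side helper: the doubling `while True` loop; fuel k+1 is proved sufficient below
def pvGrow (fuel k limit : Nat) : List Nat :=
  match fuel with
  | 0 => pvSieve limit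
  | f + 1 =>
    let primes := pvSieve limit
    if k ≤ primes.length then primes else pvGrow f k (limit * 2)

def get_primorials_alt (k_max : Int) : List Int :=
  if k_max ≤ 0 then []
  else
    (pvRunProd 1 ((pvGrow (k_max.toNat + 1) k_max.toNat 4).take k_max.toNat)).map
      (fun x => (x : Int))

-- ===== PRECONDITION & SPEC =====
def Spec_get_primorials (k_max : Int) (out : List Int) : Prop := out = get_primorials_alt k_max
instance (k_max : Int) (out : List Int) : Decidable (Spec_get_primorials k_max out) := by unfold Spec_get_primorials; infer_instance

-- ===== CLAIM (what is proved, stated in full; the proofs are below) =====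
def Claim_equal_get_primorials : Prop := ∀ (k_max : Int), Dom_get_primorials k_max → Spec_get_primorials k_max (get_primorials k_max)

-- ===== LEMMAS AND PROOFS =====

-- the list of primes below c, in increasing order: common reference point of both ports
def pvF (c : Nat) : List Nat := (List.range c).filter (fun m => decide (Nat.Prime m))

lemma pvF_length (c : Nat) : (pvF c).length = Nat.count Nat.Prime c := by
  simp [pvF, Nat.count, List.countP_eq_length_filter]

lemma pvF_mem {m c : Nat} : m ∈ pvF c ↔ Nat.Prime m ∧ m < c := by
  simp [pvF, List.mem_filter, List.mem_range, and_comm]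

lemma pvF_succ (c : Nat) :
    pvF (c + 1) = if Nat.Prime c then pvF c ++ [c] else pvF c := by
  simp only [pvF, List.range_succ, List.filter_append]
  by_cases hc : Nat.Prime c <;> simp [hc]

lemma pvF_sorted (c : Nat) : (pvF c).Pairwise (· < ·) := by
  exact (List.pairwise_lt_range).filter _

lemma pvF_take_congr {k a b : Nat} (ha : k ≤ Nat.count Nat.Prime a) (hab : a ≤ b) :
    (pvF b).take k = (pvF a).take k := by
  have hpre : pvF a <+: pvF b := by
    refine List.IsPrefix.filter _ ?_
    rw [List.prefix_iff_eq_take]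
    simp [List.take_range, hab]
  obtain ⟨t, ht⟩ := hpre
  rw [← ht, List.take_append_of_le_length]
  rw [pvF_length]; exact ha

lemma pvF_take_eq {k a b : Nat} (ha : k ≤ Nat.count Nat.Prime a)
    (hb : k ≤ Nat.count Nat.Prime b) : (pvF a).take k = (pvF b).take k := by
  rcases le_total a b with h | h
  · exact (pvF_take_congr ha h).symm
  · exact pvF_take_congr hb h

-- a number c ≥ 2 is composite iff it has a prime factor p with p < c and p*p ≤ c
lemma pvCompositeIff {c : Nat} (h2 : 2 ≤ c) :
    ¬ Nat.Prime c ↔ ∃ p, Nat.Prime p ∧ p < c ∧ p ∣ c ∧ p * p ≤ c := by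
  constructor
  · intro hnp
    refine ⟨c.minFac, Nat.minFac_prime (by omega), ?_, Nat.minFac_dvd c, ?_⟩
    · exact (Nat.not_prime_iff_minFac_lt h2).mp hnp
    · have := Nat.minFac_sq_le_self (by omega) hnp
      simpa [pow_two] using this
  · rintro ⟨p, hp, hlt, hdvd, -⟩ hc
    rcases (Nat.Prime.eq_one_or_self_of_dvd hc p hdvd) with h | h
    · exact absurd h (Nat.Prime.ne_one hp)
    · omega

lemma pvTrialA_false {l : List Nat} {c p : Nat} (hs : l.Pairwise (· < ·)) (hmem : p ∈ l)
    (hdvd : p ∣ c) (hsq : p * p ≤ c) : pvTrialA c l = false := by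
  induction l with
  | nil => cases hmem
  | cons q t ih =>
    rcases List.mem_cons.mp hmem with rfl | hmem'
    · have hqq : ¬ c < p * p := by omega
      have hmod : c % p = 0 := Nat.dvd_iff_mod_eq_zero.mp hdvd
      simp [pvTrialA, hqq, hmod]
    · have hq : q < p := List.rel_of_pairwise_cons hs hmem'
      have hqq : ¬ c < q * q := by
        have : q * q ≤ p * p := Nat.mul_le_mul (le_of_lt hq) (le_of_lt hq)
        omega
      simp only [pvTrialA, if_neg hqq]
      by_cases hmod : c % q = 0
      · simp [hmod]
      · simp only [if_neg hmod]
        exact ih hs.of_cons hmem'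

lemma pvTrialA_true {l : List Nat} {c : Nat} (hc : Nat.Prime c)
    (hl : ∀ q ∈ l, Nat.Prime q ∧ q < c) : pvTrialA c l = true := by
  induction l with
  | nil => rfl
  | cons q t ih =>
    obtain ⟨hq, hqc⟩ := hl q (List.mem_cons_self)
    by_cases hqq : c < q * q
    · simp [pvTrialA, hqq]
    · have hmod : ¬ c % q = 0 := by
        intro hmod
        have hdvd : q ∣ c := Nat.dvd_of_mod_eq_zero hmod
        rcases (Nat.Prime.eq_one_or_self_of_dvd hc q hdvd) with h | h
        · exact (Nat.Prime.ne_one hq) h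
        · omega
      simp only [pvTrialA, if_neg hqq, if_neg hmod]
      exact ih (fun q hq => hl q (List.mem_cons_of_mem _ hq))

lemma pvTrialA_eq {c : Nat} (h2 : 2 ≤ c) :
    pvTrialA c (pvF c) = decide (Nat.Prime c) := by
  by_cases hc : Nat.Prime c
  · rw [pvTrialA_true hc (fun q hq => pvF_mem.mp hq), decide_eq_true hc]
  · obtain ⟨p, hp, hlt, hdvd, hsq⟩ := (pvCompositeIff h2).mp hc
    rw [pvTrialA_false (pvF_sorted c) (pvF_mem.mpr ⟨hp, hlt⟩) hdvd hsq]
    simp [hc]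

lemma pvLoopA_inv (n : Nat) : ∀ (fuel c : Nat), 2 ≤ c →
    Nat.count Nat.Prime c ≤ n → n ≤ Nat.count Nat.Prime (c + fuel) →
    pvLoopA fuel n (pvF c) c = (pvF (c + fuel)).take n := by
  intro fuel
  induction fuel with
  | zero =>
    intro c h2 hle hge
    have hn : Nat.count Nat.Prime c = n := le_antisymm hle (by simpa using hge)
    simp only [pvLoopA, Nat.add_zero]
    rw [List.take_of_length_le (by rw [pvF_length, hn])]
  | succ f ih =>
    intro c h2 hle hge
    by_cases hlt : (pvF c).length < n
    · have hstep : (if pvTrialA c (pvF c) then pvF c ++ [c] else pvF c) = pvF (c + 1) := by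
        rw [pvTrialA_eq h2, pvF_succ]
        by_cases hc : Nat.Prime c <;> simp [hc]
      simp only [pvLoopA, if_pos hlt, hstep]
      have hle' : Nat.count Nat.Prime (c + 1) ≤ n := by
        rw [Nat.count_succ]
        rw [pvF_length] at hlt
        split_ifs <;> omega
      have hge' : n ≤ Nat.count Nat.Prime (c + 1 + f) := by
        have : c + 1 + f = c + (f + 1) := by omega
        rw [this]; exact hge
      rw [show c + (f + 1) = (c + 1) + f from by omega]
      exact ih (c + 1) (by omega) hle' hge'
    · simp only [pvLoopA, if_neg hlt]
      rw [pvF_length] at hlt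
      have hcnt : n ≤ Nat.count Nat.Prime c := by omega
      rw [pvF_take_congr hcnt (by omega),
        List.take_of_length_le (by rw [pvF_length]; omega)]

-- Bertrand gives enough primes within the fuel bounds
lemma pvCountPow (n : Nat) : n ≤ Nat.count Nat.Prime (2 ^ (n + 1) + 1) := by
  induction n with
  | zero => exact Nat.zero_le _
  | succ m ih =>
    obtain ⟨p, hp, hlo, hhi⟩ :=
      Nat.exists_prime_lt_and_le_two_mul (2 ^ (m + 1)) (by positivity)
    have h1 : Nat.count Nat.Prime (2 ^ (m + 1) + 1) ≤ Nat.count Nat.Prime p :=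
      Nat.count_monotone _ (by omega)
    have h2 : Nat.count Nat.Prime p < Nat.count Nat.Prime (2 ^ (m + 1 + 1) + 1) :=
      Nat.count_strict_mono hp (by
        have : 2 * 2 ^ (m + 1) = 2 ^ (m + 1 + 1) := by ring
        omega)
    omega

lemma pvGetPrimes_eq (n : Nat) :
    pvGetPrimes n = (pvF (2 + 2 ^ (n + 1))).take n ∧
      n ≤ Nat.count Nat.Prime (2 + 2 ^ (n + 1)) := by
  have hge : n ≤ Nat.count Nat.Prime (2 + 2 ^ (n + 1)) :=
    le_trans (pvCountPow n) (Nat.count_monotone _ (by omega))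
  refine ⟨?_, hge⟩
  have h0 : pvF 2 = [] := by decide
  have hc2 : Nat.count Nat.Prime 2 = 0 := by
    have := pvF_length 2; rw [h0] at this; simpa using this.symm
  unfold pvGetPrimes
  rw [← h0]
  exact pvLoopA_inv n (2 ^ (n + 1)) 2 le_rfl (by omega) hge

-- ----- B side -----

lemma pvGetD_set (l : List Bool) (i m : Nat) (b c : Bool) :
    (l.set i b).getD m c = if m = i ∧ i < l.length then b else l.getD m c := by
  simp [List.getD, List.getElem?_set]
  split_ifs <;> simp_all

lemma pvMark_length (limit i j : Nat) (comp : List Bool) :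
    (pvMark limit i j comp).length = comp.length := by
  fun_induction pvMark <;> simp_all [List.length_set]

lemma pvMark_getD (limit i : Nat) (hi : 0 < i) : ∀ (fuel j : Nat) (comp : List Bool),
    limit + 1 - j ≤ fuel → comp.length = limit + 1 → ∀ m,
    (pvMark limit i j comp).getD m false =
      (comp.getD m false || decide (j ≤ m ∧ m ≤ limit ∧ i ∣ (m - j))) := by
  intro fuel
  induction fuel with
  | zero =>
    intro j comp hf hlen m
    rw [pvMark, dif_neg (by omega)]
    have hnot : ¬ (j ≤ m ∧ m ≤ limit ∧ i ∣ (m - j)) := by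
      rintro ⟨h1, h2, -⟩; omega
    simp [hnot]
  | succ f ih =>
    intro j comp hf hlen m
    by_cases hj : j ≤ limit
    · rw [pvMark, dif_pos ⟨hi, hj⟩,
        ih (j + i) (comp.set j true) (by omega) (by rw [List.length_set, hlen]) m,
        pvGetD_set]
      by_cases hm : m = j
      · subst hm
        have h1 : m < comp.length := by omega
        have h2 : ¬ (m + i ≤ m) := by omega
        simp [h1, h2, hj]
      · rw [if_neg (by simp [hm])]
        congr 1
        rw [decide_eq_decide]
        constructor
        · rintro ⟨h1, h2, h3⟩
          refine ⟨by omega, h2, ?_⟩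
          have hsub : m - j = (m - (j + i)) + i := by omega
          rw [hsub]; exact Nat.dvd_add h3 (dvd_refl i)
        · rintro ⟨h1, h2, h3⟩
          have hjm : j < m := by omega
          have hle : i ≤ m - j := Nat.le_of_dvd (by omega) h3
          refine ⟨by omega, h2, ?_⟩
          have hsub : m - (j + i) = (m - j) - i := by omega
          rw [hsub]; exact Nat.dvd_sub h3 (dvd_refl i)
    · rw [pvMark, dif_neg (by omega)]
      have hnot : ¬ (j ≤ m ∧ m ≤ limit ∧ i ∣ (m - j)) := by
        rintro ⟨h1, h2, -⟩; omega
      simp [hnot]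

lemma pvOuter_inv (limit : Nat) : ∀ (fuel i : Nat) (primes : List Nat) (comp : List Bool),
    limit + 1 - i ≤ fuel → 2 ≤ i → comp.length = limit + 1 →
    (∀ m, m ≤ limit → (comp.getD m false = true ↔
      ∃ p, Nat.Prime p ∧ p < i ∧ p ∣ m ∧ p * p ≤ m)) →
    pvOuter limit i primes comp =
      primes ++ (List.range' i (limit + 1 - i)).filter (fun m => decide (Nat.Prime m)) := by
  intro fuel
  induction fuel with
  | zero =>
    intro i primes comp hf h2 hlen hinv
    rw [pvOuter, dif_neg (by omega)]
    have : limit + 1 - i = 0 := by omega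
    simp [this]
  | succ f ih =>
    intro i primes comp hf h2 hlen hinv
    by_cases hile : i ≤ limit
    · have hrange : List.range' i (limit + 1 - i) = i :: List.range' (i + 1) (limit + 1 - (i + 1)) := by
        rw [show limit + 1 - i = (limit + 1 - (i + 1)) + 1 from by omega, List.range'_succ]
      have hiff : comp.getD i false = true ↔ ¬ Nat.Prime i := by
        rw [hinv i hile, ← pvCompositeIff h2]
      rw [pvOuter, dif_pos hile]
      by_cases hpr : Nat.Prime i
      · have hfalse : comp.getD i false = false := by
          cases h : comp.getD i false
          · rfl
          · exact absurd (hiff.mp h) (not_not_intro hpr)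
        have hinv' : ∀ m, m ≤ limit →
            ((pvMark limit i (i * i) comp).getD m false = true ↔
              ∃ p, Nat.Prime p ∧ p < i + 1 ∧ p ∣ m ∧ p * p ≤ m) := by
          intro m hm
          rw [pvMark_getD limit i (by omega) (limit + 1) (i * i) comp (by omega) hlen m]
          have hdv : (i * i ≤ m ∧ m ≤ limit ∧ i ∣ (m - i * i)) ↔ (i ∣ m ∧ i * i ≤ m) := by
            constructor
            · rintro ⟨h1, -, h3⟩
              refine ⟨?_, h1⟩
              have hsub : m = (m - i * i) + i * i := by omega
              rw [hsub]; exact Nat.dvd_add h3 (Dvd.intro i rfl)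
            · rintro ⟨h1, h3⟩
              exact ⟨h3, hm, Nat.dvd_sub h1 (Dvd.intro i rfl)⟩
          simp only [Bool.or_eq_true, decide_eq_true_eq, hinv m hm, hdv]
          constructor
          · rintro (⟨p, hp, hlt, hdvd, hsq⟩ | ⟨hdvd, hsq⟩)
            · exact ⟨p, hp, by omega, hdvd, hsq⟩
            · exact ⟨i, hpr, by omega, hdvd, hsq⟩
          · rintro ⟨p, hp, hlt, hdvd, hsq⟩
            by_cases hpi : p = i
            · subst hpi; exact Or.inr ⟨hdvd, hsq⟩
            · exact Or.inl ⟨p, hp, by omega, hdvd, hsq⟩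
        rw [if_neg (by rw [hfalse]; exact Bool.false_ne_true),
          ih (i + 1) (primes ++ [i]) (pvMark limit i (i * i) comp) (by omega) (by omega)
            (by rw [pvMark_length, hlen]) hinv', hrange]
        simp [hpr]
      · have htrue : comp.getD i false = true := hiff.mpr hpr
        have hinv' : ∀ m, m ≤ limit → (comp.getD m false = true ↔
            ∃ p, Nat.Prime p ∧ p < i + 1 ∧ p ∣ m ∧ p * p ≤ m) := by
          intro m hm
          rw [hinv m hm]
          constructor
          · rintro ⟨p, hp, hlt, hdvd, hsq⟩
            exact ⟨p, hp, by omega, hdvd, hsq⟩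
          · rintro ⟨p, hp, hlt, hdvd, hsq⟩
            by_cases hpi : p = i
            · subst hpi; exact absurd hp hpr
            · exact ⟨p, hp, by omega, hdvd, hsq⟩
        rw [if_pos (by rw [htrue]),
          ih (i + 1) primes comp (by omega) (by omega) hlen hinv', hrange]
        simp [hpr]
    · rw [pvOuter, dif_neg (by omega)]
      have : limit + 1 - i = 0 := by omega
      simp [this]

lemma pvSieve_eq {limit : Nat} (h2 : 2 ≤ limit) : pvSieve limit = pvF (limit + 1) := by
  have hinv0 : ∀ m, m ≤ limit →
      (((List.replicate (limit + 1) false).getD m false) = true ↔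
        ∃ p, Nat.Prime p ∧ p < 2 ∧ p ∣ m ∧ p * p ≤ m) := by
    intro m hm
    constructor
    · intro h
      simp [List.getD, List.getElem?_replicate] at h
      split_ifs at h <;> simp_all
    · rintro ⟨p, hp, hlt, -, -⟩
      have := hp.two_le
      omega
  unfold pvSieve
  rw [pvOuter_inv limit (limit + 1) 2 [] (List.replicate (limit + 1) false) (by omega)
    (by omega) (by simp) hinv0]
  have hsplit : List.range (limit + 1) = [0, 1] ++ List.range' 2 (limit + 1 - 2) := by
    rw [show limit + 1 = (limit - 1) + 2 from by omega, List.range_eq_range']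
    rw [show limit - 1 + 2 - 2 = limit - 1 from by omega]
    rfl
  rw [pvF, hsplit, List.filter_append]
  norm_num [Nat.not_prime_zero, Nat.not_prime_one]

lemma pvGrow_eq (k : Nat) : ∀ (fuel limit : Nat), 2 ≤ limit →
    k ≤ Nat.count Nat.Prime (limit * 2 ^ fuel + 1) →
    ∃ L, pvGrow fuel k limit = pvF L ∧ k ≤ Nat.count Nat.Prime L := by
  intro fuel
  induction fuel with
  | zero =>
    intro limit h2 hk
    exact ⟨limit + 1, pvSieve_eq h2, by simpa using hk⟩
  | succ f ih =>
    intro limit h2 hk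
    simp only [pvGrow, pvSieve_eq h2]
    by_cases hlen : k ≤ (pvF (limit + 1)).length
    · rw [pvF_length] at hlen
      exact ⟨limit + 1, by simp [hlen, pvF_length], hlen⟩
    · rw [if_neg hlen]
      refine ih (limit * 2) (by omega) ?_
      have : limit * 2 * 2 ^ f = limit * 2 ^ (f + 1) := by ring
      rw [this]; exact hk

-- ===== VERDICT (by name: the statement is the Claim_ definition above) =====
theorem get_primorials_spec : Claim_equal_get_primorials := by
  intro k_max _
  unfold Spec_get_primorials
  by_cases hk : k_max ≤ 0
  · have h0 : k_max.toNat = 0 := Int.toNat_of_nonpos hk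
    simp only [get_primorials, get_primorials_alt, if_pos hk, h0]
    rfl
  · obtain ⟨hA, hAcnt⟩ := pvGetPrimes_eq k_max.toNat
    have hgrow : k_max.toNat ≤ Nat.count Nat.Prime (4 * 2 ^ (k_max.toNat + 1) + 1) :=
      le_trans (pvCountPow k_max.toNat) (Nat.count_monotone _ (by
        have : 2 ^ (k_max.toNat + 1) ≤ 4 * 2 ^ (k_max.toNat + 1) := by omega
        omega))
    obtain ⟨L, hB, hBcnt⟩ := pvGrow_eq k_max.toNat (k_max.toNat + 1) 4 (by omega) hgrow
    simp only [get_primorials, get_primorials_alt, if_neg hk, hA, hB]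
    rw [pvF_take_eq hAcnt hBcnt]
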